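-- pv_equiv track=rewrite | github.com/danielconte/appClasses | app.py | prepararTexto
-- ===== SOURCE A (Python) =====
-- def prepararTexto(textoP):
--     texto = []
--     novaFrase = []
--     for frase in textoP:
--         for palavra in frase:
--             if palavra[0] != "":
--                 if palavra[2] == "C":
--                     texto.append(novaFrase)
--                     novaFrase = []
--                 novaFrase.append([palavra[0],palavra[1],palavra[2]])
--     return texto
-- ===== SOURCE B (Python) =====
-- def prepararTexto(textoP):
--     # Flatten + filter once, find the C boundary indices, then build the result by slicing.
--     W = [[p[0], p[1], p[2]] for frase in textoP for p in frase if p[0] != ""]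
--     cpos = [i for i, w in enumerate(W) if w[2] == "C"]
--     texto = []
--     prev = 0
--     for c in cpos:
--         texto.append(W[prev:c])
--         prev = c
--     return texto
-- ===== Notes on version B (the rewrite author's own statement) =====
-- stated objective: alternative
-- what changed: Instead of A's incremental accumulator loop that flushes a growing phrase at each 'C' marker, B flattens and filters the words once, computes the list of 'C' boundary indices, and builds the result by slicing the flat list between consecutive boundaries.
import Mathlib
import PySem

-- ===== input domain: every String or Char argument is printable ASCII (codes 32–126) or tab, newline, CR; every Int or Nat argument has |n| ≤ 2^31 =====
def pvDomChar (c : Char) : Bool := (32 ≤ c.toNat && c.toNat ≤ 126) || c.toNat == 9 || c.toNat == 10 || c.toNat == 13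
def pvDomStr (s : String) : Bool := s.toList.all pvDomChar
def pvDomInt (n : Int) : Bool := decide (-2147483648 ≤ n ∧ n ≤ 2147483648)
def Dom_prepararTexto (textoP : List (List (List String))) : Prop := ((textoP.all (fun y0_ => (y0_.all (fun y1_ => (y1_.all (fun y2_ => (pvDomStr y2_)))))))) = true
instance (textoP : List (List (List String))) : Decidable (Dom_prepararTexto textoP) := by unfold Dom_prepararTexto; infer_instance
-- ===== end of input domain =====

-- B replaces A's incremental flush-at-'C' accumulator loop by flatten+filter once,
-- collect the 'C' boundary indices, and build the result by slicing between boundaries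
-- (alternative decomposition, same asymptotic cost).


-- ===== PORT A =====
-- palavra[i] is ported as (pyGet? palavra i).getD ""; Pre_ guarantees the index is in
-- range, so the default is never taken on admitted inputs.
def pvIdx (p : List String) (i : Int) : String := (PySem.List.pyGet? p i).getD ""

-- the body of A's inner loop: flush novaFrase at a "C" marker, then append the triple
def pvStepA (st : List (List (List String)) × List (List String)) (palavra : List String) :
    List (List (List String)) × List (List String) :=
  if pvIdx palavra 0 ≠ "" then
    let st1 := if pvIdx palavra 2 = "C" then (st.1 ++ [st.2], ([] : List (List String))) else st
    (st1.1, st1.2 ++ [[pvIdx palavra 0, pvIdx palavra 1, pvIdx palavra 2]])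
  else st

def prepararTexto (textoP : List (List (List String))) : List (List (List String)) :=
  (textoP.foldl (fun st frase => frase.foldl pvStepA st) (([], []))).1

-- ===== PORT B =====
-- one comprehension entry: keep palavra iff palavra[0] != "", mapped to its triple
def pvKeep (p : List String) : Option (List String) :=
  if pvIdx p 0 ≠ "" then some [pvIdx p 0, pvIdx p 1, pvIdx p 2] else none

def prepararTexto_alt (textoP : List (List (List String))) : List (List (List String)) :=
  let W := (textoP.flatMap (fun frase => frase)).filterMap pvKeep
  let cpos := ((PySem.List.enumerate W 0).filter (fun iw => pvIdx iw.2 2 == "C")).map (·.1)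
  (cpos.foldl
    (fun (st : List (List (List String)) × Int) c =>
      (st.1 ++ [PySem.List.slice W (some st.2) (some c)], c))
    (([], 0))).1

-- ===== PRECONDITION & SPEC =====
-- Pre_ excludes exactly the inputs where the Python A raises IndexError:
-- palavra[0] needs a nonempty word, and palavra[1]/palavra[2] are read when palavra[0] != "".
def Pre_prepararTexto (textoP : List (List (List String))) : Prop :=
  ∀ frase ∈ textoP, ∀ p ∈ frase, p ≠ [] ∧ (pvIdx p 0 ≠ "" → 3 ≤ p.length)
instance (textoP : List (List (List String))) : Decidable (Pre_prepararTexto textoP) := by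
  unfold Pre_prepararTexto; infer_instance

def pvWitness_prepararTexto : List (List (List String)) :=
  [[["a", "b", "C"], ["x", "y", "N"]], [["c", "d", "C"]]]

def Spec_prepararTexto (textoP : List (List (List String))) (out : List (List (List String))) : Prop := out = prepararTexto_alt textoP
instance (textoP : List (List (List String))) (out : List (List (List String))) : Decidable (Spec_prepararTexto textoP out) := by unfold Spec_prepararTexto; infer_instance

-- ===== CLAIM (what is proved, stated in full; the proofs are below) =====
def Claim_equal_prepararTexto : Prop := ∀ (textoP : List (List (List String))), Dom_prepararTexto textoP → Pre_prepararTexto textoP → Spec_prepararTexto textoP (prepararTexto textoP)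

-- ===== LEMMAS AND PROOFS =====

-- the canonical segmentation both programs compute over the flat filtered word list
def pvSeg (cur : List (List String)) : List (List String) → List (List (List String))
  | [] => []
  | w :: ws => if pvIdx w 2 = "C" then cur :: pvSeg [w] ws else pvSeg (cur ++ [w]) ws

-- A's step, seen on the already-filtered triples
def pvStepW (st : List (List (List String)) × List (List String)) (w : List String) :
    List (List (List String)) × List (List String) :=
  if pvIdx w 2 = "C" then (st.1 ++ [st.2], [w]) else (st.1, st.2 ++ [w])

lemma pvIdx_triple2 (a b c : String) : pvIdx [a, b, c] 2 = c := by
  simp [pvIdx, PySem.List.pyGet?, PySem.List.pyIdx?]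

lemma pvStepA_eq (ws : List (List String)) (st : List (List (List String)) × List (List String)) :
    ws.foldl pvStepA st = (ws.filterMap pvKeep).foldl pvStepW st := by
  induction ws generalizing st with
  | nil => rfl
  | cons w ws ih =>
    simp only [List.foldl_cons, List.filterMap_cons]
    by_cases h : pvIdx w 0 ≠ ""
    · have hk : pvKeep w = some [pvIdx w 0, pvIdx w 1, pvIdx w 2] := by simp [pvKeep, h]
      have hs : pvStepA st w = pvStepW st [pvIdx w 0, pvIdx w 1, pvIdx w 2] := by
        simp only [pvStepA, pvStepW, if_pos h, pvIdx_triple2]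
        by_cases hc : pvIdx w 2 = "C" <;> simp [hc]
      rw [hk, List.foldl_cons, ih, hs]
    · have hk : pvKeep w = none := by simp [pvKeep, h]
      have hs : pvStepA st w = st := by simp [pvStepA, h]
      rw [hk, hs, ih]

lemma pvFoldW_seg (W : List (List String)) (texto : List (List (List String)))
    (cur : List (List String)) :
    (W.foldl pvStepW (texto, cur)).1 = texto ++ pvSeg cur W := by
  induction W generalizing texto cur with
  | nil => simp [pvSeg]
  | cons w ws ih =>
    by_cases hc : pvIdx w 2 = "C"
    · simp [pvStepW, pvSeg, hc, ih]
    · simp [pvStepW, pvSeg, hc, ih]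

-- the B-side invariant: W = P ++ cur ++ V, the fold's prev pointer sits at P.length
-- (the start of the open segment cur), and the remaining boundaries are those of V.
lemma pvFoldB_seg (V : List (List String)) (P cur : List (List String))
    (out : List (List (List String))) :
    ((((PySem.List.enumerate V ((P.length + cur.length : Nat) : Int)).filter
          (fun iw => pvIdx iw.2 2 == "C")).map (·.1)).foldl
      (fun (st : List (List (List String)) × Int) c =>
        (st.1 ++ [PySem.List.slice (P ++ cur ++ V) (some st.2) (some c)], c))
      (out, ((P.length : Nat) : Int))).1 = out ++ pvSeg cur V := by
  induction V generalizing P cur out with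
  | nil => simp [pvSeg, PySem.List.enumerate]
  | cons w ws ih =>
    rw [PySem.List.enumerate_cons]
    by_cases hc : pvIdx w 2 = "C"
    · simp only [List.filter_cons, hc, beq_self_eq_true, if_pos, List.map_cons, List.foldl_cons]
      have h1 : PySem.List.slice (P ++ cur ++ (w :: ws)) (some ((P.length : Nat) : Int))
          (some ((P.length + cur.length : Nat) : Int)) = cur := by
        rw [PySem.List.slice_natCast]
        simp
      have h2 := ih (P ++ cur) [w] (out ++ [cur])
      simp only [List.length_append, List.length_cons, List.length_nil, Nat.zero_add] at h2
      have hcast : ((P.length + cur.length : Nat) : Int) + 1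
          = ((P.length + cur.length + 1 : Nat) : Int) := by push_cast; ring
      rw [h1, hcast]
      have hW : P ++ cur ++ (w :: ws) = (P ++ cur) ++ [w] ++ ws := by simp
      rw [hW]
      rw [h2]
      simp [pvSeg, hc]
    · have hne : ¬ ((pvIdx w 2 == "C") = true) := by simpa using hc
      simp only [List.filter_cons, hne, if_neg, Bool.false_eq_true,
        not_false_eq_true]
      have h2 := ih P (cur ++ [w]) out
      simp only [List.length_append, List.length_cons, List.length_nil, Nat.zero_add] at h2
      have hcast : ((P.length + cur.length : Nat) : Int) + 1
          = ((P.length + (cur.length + 1) : Nat) : Int) := by push_cast; ring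
      have hW : P ++ cur ++ (w :: ws) = P ++ (cur ++ [w]) ++ ws := by simp
      rw [hcast, hW, h2]
      simp [pvSeg, hc]

-- ===== VERDICT (by name: the statement is the Claim_ definition above) =====
theorem prepararTexto_spec : Claim_equal_prepararTexto := by
  intro textoP _ _
  unfold Spec_prepararTexto prepararTexto prepararTexto_alt
  rw [show (fun frase => frase) = (id : List (List String) → List (List String)) from rfl,
    List.flatMap_id, ← List.foldl_flatten, pvStepA_eq, pvFoldW_seg]
  have h := pvFoldB_seg (textoP.flatten.filterMap pvKeep) [] [] []
  simp only [List.length_nil, Nat.zero_add, List.nil_append,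
    Nat.cast_zero] at h
  simp only [List.nil_append]
  rw [← h]
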